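-- pv_equiv track=rewrite | github.com/Choi1234567/Acm_specil.data.Structure | Acm_special/5.3. Fix the Tree! (Hard).py | fix_arr
-- ===== SOURCE A (Python) =====
-- def fix_arr(arr):
--     max_len = 1#所有最长增长子序列默认为1，就是它本身
--     dp = [1] * len(arr)#dp[i]代表，以i结尾的最长递增子序列是几，例如dp[2] = 2，因为有两个元素1，2，递增，所以是2
--     for i in range(1, len(arr)):
--         for j in range(i):
--             if arr[j] < arr[i] and arr[i] - arr[j] >= i - j and arr[i] >= i + 1 and arr[j] >= j + 1:#相邻差距要大于1，第n个要大于等于n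
--                 dp[i] = max(dp[i], dp[j] + 1)#dp[i] 或者dp[j] + 1，对比一下看看谁更大
--         max_len = max(max_len, dp[i])
--     return len(arr) - max_len#得出需要改变对节点
-- ===== SOURCE B (Python) =====
-- def fix_arr(arr):
--     # Patience sorting on b[i] = arr[i] - i restricted to positions with b[i] >= 1:
--     # answer = n - max(1, length of longest non-decreasing subsequence of those b's).
--     tails = []
--     for i, x in enumerate(arr):
--         b = x - i
--         if b >= 1:
--             # bisect_right by hand (A imports nothing, so no bisect module)
--             lo, hi = 0, len(tails)
--             while lo < hi:
--                 mid = (lo + hi) // 2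
--                 if tails[mid] <= b:
--                     lo = mid + 1
--                 else:
--                     hi = mid
--             if lo == len(tails):
--                 tails.append(b)
--             else:
--                 tails[lo] = b
--     return len(arr) - max(1, len(tails))
-- ===== Notes on version B (the rewrite author's own statement) =====
-- stated objective: faster
-- what changed: Replaces the O(n^2) double-loop DP with patience sorting: a single pass keeping a binary-searched 'tails' list of the values arr[i]-i over positions where arr[i]-i >= 1 (longest non-decreasing subsequence).
import Mathlib
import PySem

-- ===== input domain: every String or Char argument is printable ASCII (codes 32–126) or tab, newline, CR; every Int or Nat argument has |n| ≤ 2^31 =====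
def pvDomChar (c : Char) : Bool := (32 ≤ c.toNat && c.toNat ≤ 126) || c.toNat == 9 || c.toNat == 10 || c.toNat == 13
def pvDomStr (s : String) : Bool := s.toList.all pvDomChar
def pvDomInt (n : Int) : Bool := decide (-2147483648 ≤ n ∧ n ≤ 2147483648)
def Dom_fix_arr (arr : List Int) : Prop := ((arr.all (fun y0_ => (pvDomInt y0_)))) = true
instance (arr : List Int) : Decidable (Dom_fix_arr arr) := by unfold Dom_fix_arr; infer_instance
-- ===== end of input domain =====

-- B replaces A's O(n^2) double-loop DP by patience sorting on arr[i]-i (faster).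

-- ===== PORT A =====
-- body of the inner 'for j in range(i)' loop: the guarded dp[i] update
def fixArrIf (arr : List Int) (i : Int) (dp : List Int) (j : Int) : List Int :=
  if PySem.List.pyGetD arr j 0 < PySem.List.pyGetD arr i 0 ∧
     PySem.List.pyGetD arr i 0 - PySem.List.pyGetD arr j 0 ≥ i - j ∧
     PySem.List.pyGetD arr i 0 ≥ i + 1 ∧
     PySem.List.pyGetD arr j 0 ≥ j + 1 then
    PySem.List.pySetD dp i (max (PySem.List.pyGetD dp i 0) (PySem.List.pyGetD dp j 0 + 1))
  else dp

-- the inner 'for j in range(i)' loop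
def fixArrInner (arr : List Int) (i : Int) (dp : List Int) : List Int :=
  (PySem.List.pyRange 0 i 1).foldl (fixArrIf arr i) dp

-- outer 'for i in range(1, len(arr))' loop body: state = (max_len, dp)
def fixArrOuter (arr : List Int) (st : Int × List Int) (i : Int) : Int × List Int :=
  let dp := fixArrInner arr i st.2
  (max st.1 (PySem.List.pyGetD dp i 0), dp)

def fix_arr (arr : List Int) : Int :=
  let st := (PySem.List.pyRange 1 (arr.length : Int) 1).foldl (fixArrOuter arr)
              (1, List.replicate arr.length (1 : Int))
  (arr.length : Int) - st.1

-- ===== PORT B =====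
-- hand-written bisect_right of Source B (while lo < hi … )
def fixArrBisect (tails : List Int) (b : Int) (lo hi : Int) : Int :=
  if h : lo < hi then
    if PySem.List.pyGetD tails (PySem.Int.floordiv (lo + hi) 2) 0 ≤ b then
      fixArrBisect tails b (PySem.Int.floordiv (lo + hi) 2 + 1) hi
    else
      fixArrBisect tails b lo (PySem.Int.floordiv (lo + hi) 2)
  else lo
termination_by (hi - lo).toNat
decreasing_by
  · have h1 := PySem.Int.floordiv_two_mid_bounds (le_of_lt h)
    omega
  · have h1 := PySem.Int.floordiv_two_mid_bounds (le_of_lt h)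
    have h2 : PySem.Int.floordiv (lo + hi) 2 < hi := by
      rw [PySem.Int.floordiv_lt_iff_lt_mul (by norm_num)]
      omega
    omega

-- loop body of Source B: one enumerated element (i, x)
def fixArrStep (tails : List Int) (p : Int × Int) : List Int :=
  let b := p.2 - p.1
  if 1 ≤ b then
    let lo := fixArrBisect tails b 0 (tails.length : Int)
    if lo = (tails.length : Int) then tails ++ [b]
    else PySem.List.pySetD tails lo b
  else tails

def fix_arr_alt (arr : List Int) : Int :=
  let tails := (PySem.List.enumerate arr 0).foldl fixArrStep []
  (arr.length : Int) - max 1 (tails.length : Int)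

-- ===== PRECONDITION & SPEC =====
def Spec_fix_arr (arr : List Int) (out : Int) : Prop := out = fix_arr_alt arr
instance (arr : List Int) (out : Int) : Decidable (Spec_fix_arr arr out) := by unfold Spec_fix_arr; infer_instance

-- ===== CLAIM (what is proved, stated in full; the proofs are below) =====
def Claim_equal_fix_arr : Prop := ∀ (arr : List Int), Dom_fix_arr arr → Spec_fix_arr arr (fix_arr arr)

-- ===== LEMMAS AND PROOFS =====

-- b i = arr[i] - i; a position i "qualifies" iff 1 ≤ b i.
def pvB (arr : List Int) (i : Nat) : Int := arr.getD i 0 - (i : Int)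

-- A "chain" within prefix p: strictly increasing qualifying positions with
-- non-decreasing b values.  Both programs compute n - max(1, longest chain).
def PCh (arr : List Int) (p : Nat) (s : List Nat) : Prop :=
  s.Pairwise (· < ·) ∧ (∀ j ∈ s, j < p ∧ 1 ≤ pvB arr j) ∧ (s.map (pvB arr)).Pairwise (· ≤ ·)

lemma PCh_nil (arr : List Int) (p : Nat) : PCh arr p [] := by
  simp [PCh]

lemma PCh_mono {arr : List Int} {p q : Nat} (hpq : p ≤ q) {s : List Nat}
    (h : PCh arr p s) : PCh arr q s := by
  obtain ⟨h1, h2, h3⟩ := h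
  exact ⟨h1, fun j hj => ⟨lt_of_lt_of_le (h2 j hj).1 hpq, (h2 j hj).2⟩, h3⟩

lemma PCh_concat {arr : List Int} {p : Nat} {s : List Nat} {l : Nat} :
    PCh arr p (s ++ [l]) ↔
      PCh arr p s ∧ (∀ j ∈ s, j < l) ∧ l < p ∧ 1 ≤ pvB arr l ∧
      (∀ j ∈ s, pvB arr j ≤ pvB arr l) := by
  constructor
  · rintro ⟨h1, h2, h3⟩
    rw [List.pairwise_append] at h1
    rw [List.map_append, List.pairwise_append] at h3
    refine ⟨⟨h1.1, fun j hj => h2 j (by simp [hj]), h3.1⟩, ?_, ?_, ?_, ?_⟩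
    · intro j hj; exact h1.2.2 j hj l (by simp)
    · exact (h2 l (by simp)).1
    · exact (h2 l (by simp)).2
    · intro j hj; exact h3.2.2 _ (List.mem_map_of_mem hj) _ (by simp)
  · rintro ⟨⟨h1, h2, h3⟩, hlt, hlp, hq, hle⟩
    refine ⟨?_, ?_, ?_⟩
    · rw [List.pairwise_append]
      exact ⟨h1, by simp, by simpa using hlt⟩
    · intro j hj
      rcases List.mem_append.mp hj with h | h
      · exact h2 j h
      · simp only [List.mem_singleton] at h; subst h; exact ⟨hlp, hq⟩
    · rw [List.map_append, List.pairwise_append]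
      refine ⟨h3, by simp, ?_⟩
      intro a ha bb hb
      simp only [List.map_singleton, List.mem_singleton] at hb; subst hb
      obtain ⟨j, hj, rfl⟩ := List.mem_map.mp ha
      exact hle j hj

lemma PCh_bound {arr : List Int} {q p : Nat} {s : List Nat}
    (h : PCh arr q s) (hb : ∀ j ∈ s, j < p) : PCh arr p s :=
  ⟨h.1, fun j hj => ⟨hb j hj, (h.2.1 j hj).2⟩, h.2.2⟩

lemma sorted_getD_mono {t : List Int} (h : t.Pairwise (· ≤ ·)) {k m : Nat}
    (hk : k ≤ m) (hm : m < t.length) : t.getD k 0 ≤ t.getD m 0 := by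
  rcases Nat.lt_or_eq_of_le hk with h' | h'
  · have hg := List.pairwise_iff_getElem.mp h k m (by omega) hm h'
    rw [List.getD_eq_getElem _ _ (by omega), List.getD_eq_getElem _ _ hm]
    exact hg
  · subst h'; rfl

lemma getD_append_lt {t : List Int} {x : Int} {k : Nat} (h : k < t.length) :
    (t ++ [x]).getD k 0 = t.getD k 0 := by
  rw [List.getD_eq_getElem _ _ (by simp; omega), List.getD_eq_getElem _ _ h]
  exact List.getElem_append_left h

lemma getD_append_len {t : List Int} {x : Int} :
    (t ++ [x]).getD t.length 0 = x := by
  rw [List.getD_eq_getElem _ _ (by simp)]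
  simp

lemma getD_set_self {t : List Int} {v : Int} {k : Nat} (h : k < t.length) :
    (t.set k v).getD k 0 = v := by
  rw [List.getD_eq_getElem _ _ (by simpa using h)]
  simp [List.getElem_set, h]

lemma getD_set_ne {t : List Int} {v : Int} {k m : Nat} (h : m ≠ k) :
    (t.set k v).getD m 0 = t.getD m 0 := by
  by_cases hm : m < t.length
  · rw [List.getD_eq_getElem _ _ (by simpa using hm), List.getD_eq_getElem _ _ hm]
    simp [List.getElem_set, (Ne.symm h)]
  · rw [List.getD_eq_default _ _ (by simp; omega), List.getD_eq_default _ _ (by omega)]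

-- elements of a chain within prefix p, other than l, are < l there … helper:
lemma PCh_zero {arr : List Int} {s : List Nat} (h : PCh arr 0 s) : s = [] := by
  cases s with
  | nil => rfl
  | cons a t => exact absurd (h.2.1 a (by simp)).1 (by omega)

-- a sorted chain bounded by J+1 that contains J ends with J
lemma chain_mem_last {s : List Nat} {J : Nat} (hs : s.Pairwise (· < ·))
    (hb : ∀ j ∈ s, j < J + 1) (hm : J ∈ s) : ∃ s₁, s = s₁ ++ [J] := by
  induction s using List.reverseRecOn with
  | nil => simp at hm
  | append_singleton s₁ l _ =>
    rcases List.mem_append.mp hm with h | h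
    · have hlt : l < J + 1 := hb l (by simp)
      rw [List.pairwise_append] at hs
      have : J < l := hs.2.2 J h l (by simp)
      exact False.elim (by omega)
    · simp only [List.mem_singleton] at h; subst h; exact ⟨s₁, rfl⟩

-- ---------- B side ----------

def BInv (arr : List Int) (p : Nat) (t : List Int) : Prop :=
  t.Pairwise (· ≤ ·) ∧
  (∀ k : Nat, k < t.length →
     ∃ s l, PCh arr p (s ++ [l]) ∧ s.length = k ∧ pvB arr l = t.getD k 0) ∧
  (∀ s l, PCh arr p (s ++ [l]) → s.length < t.length ∧ t.getD s.length 0 ≤ pvB arr l)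

lemma bisect_spec (t : List Int) (b : Int) (hsort : t.Pairwise (· ≤ ·)) :
    ∀ (n : Nat) (lo hi : Int), (hi - lo).toNat = n → 0 ≤ lo → lo ≤ hi → hi ≤ (t.length : Int) →
    lo ≤ fixArrBisect t b lo hi ∧ fixArrBisect t b lo hi ≤ hi ∧
    (∀ k : Nat, lo ≤ (k : Int) → (k : Int) < fixArrBisect t b lo hi → t.getD k 0 ≤ b) ∧
    (∀ k : Nat, fixArrBisect t b lo hi ≤ (k : Int) → (k : Int) < hi → b < t.getD k 0) := by
  intro n
  induction n using Nat.strong_induction_on with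
  | _ n ih =>
    intro lo hi hn h0 hlh hhl
    rw [fixArrBisect]
    by_cases h : lo < hi
    · have hmid := PySem.Int.floordiv_two_mid_bounds (le_of_lt h)
      have hmhi : PySem.Int.floordiv (lo + hi) 2 < hi := by
        rw [PySem.Int.floordiv_lt_iff_lt_mul (by norm_num)]
        omega
      set mid := PySem.Int.floordiv (lo + hi) 2 with hmiddef
      have h0m : 0 ≤ mid := le_trans h0 hmid.1
      have hmlen : mid < (t.length : Int) := lt_of_lt_of_le hmhi hhl
      have hgd : PySem.List.pyGetD t mid 0 = t.getD mid.toNat 0 := by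
        rw [PySem.List.pyGetD_eq_getElem t 0 h0m hmlen]
        rw [List.getD_eq_getElem _ _ (by omega)]
      simp only [dif_pos h]
      by_cases hle : PySem.List.pyGetD t mid 0 ≤ b
      · simp only [if_pos hle]
        have hrec := ih (hi - (mid + 1)).toNat (by omega) (mid + 1) hi rfl (by omega) (by omega) hhl
        obtain ⟨r1, r2, r3, r4⟩ := hrec
        refine ⟨by omega, r2, ?_, r4⟩
        intro k hk1 hk2
        by_cases hkm : (k : Int) ≤ mid
        · calc t.getD k 0 ≤ t.getD mid.toNat 0 := sorted_getD_mono hsort (by omega) (by omega)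
            _ ≤ b := by rw [← hgd]; exact hle
        · exact r3 k (by omega) hk2
      · simp only [if_neg hle]
        have hrec := ih (mid - lo).toNat (by omega) lo mid rfl h0 hmid.1 (by omega)
        obtain ⟨r1, r2, r3, r4⟩ := hrec
        refine ⟨r1, by omega, r3, ?_⟩
        intro k hk1 hk2
        by_cases hkm : (k : Int) < mid
        · exact r4 k hk1 hkm
        · calc b < t.getD mid.toNat 0 := by rw [← hgd]; omega
            _ ≤ t.getD k 0 := sorted_getD_mono hsort (by omega) (by omega)
    · simp only [dif_neg h]
      refine ⟨le_refl _, by omega, ?_, ?_⟩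
      · intro k hk1 hk2; omega
      · intro k hk1 hk2; omega

lemma BInv_init (arr : List Int) : BInv arr 0 [] := by
  refine ⟨by simp, by simp, ?_⟩
  intro s l h
  have := PCh_zero h
  simp at this

lemma BInv_step (arr : List Int) (p : Nat) (t : List Int) (hp : p < arr.length)
    (h : BInv arr p t) : BInv arr (p + 1) (fixArrStep t ((p : Int), arr.getD p 0)) := by
  obtain ⟨hsort, hreal, hdom⟩ := h
  unfold fixArrStep
  by_cases hq : (1 : Int) ≤ arr.getD p 0 - (p : Int)
  case neg =>
    rw [if_neg hq]
    refine ⟨hsort, ?_, ?_⟩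
    · intro k hk
      obtain ⟨s, l, hch, hlen, hval⟩ := hreal k hk
      exact ⟨s, l, PCh_mono (Nat.le_succ p) hch, hlen, hval⟩
    · intro s l hch
      have hcc := PCh_concat.mp hch
      have hlne : l ≠ p := by
        intro he; subst he; exact hq hcc.2.2.2.1
      have hlt : ∀ j ∈ s ++ [l], j < p := by
        intro j hj
        rcases List.mem_append.mp hj with hj' | hj'
        · have h1 := hcc.2.1 j hj'
          have h2 := hcc.2.2.1
          omega
        · simp only [List.mem_singleton] at hj'; subst hj'
          have h2 := hcc.2.2.1; omega
      exact hdom s l (PCh_bound hch hlt)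
  case pos =>
    rw [if_pos hq]
    have hqp : 1 ≤ pvB arr p := hq
    obtain ⟨hB0, hB1, hlow, hhigh⟩ :=
      bisect_spec t (arr.getD p 0 - (p : Int)) hsort t.length 0 (t.length : Int)
        (by omega) (le_refl 0) (by omega) (le_refl _)
    set b := arr.getD p 0 - (p : Int) with hbdef
    have hbp : pvB arr p = b := rfl
    set lo := fixArrBisect t b 0 (t.length : Int) with hlodef
    have hlow' : ∀ k : Nat, (k : Int) < lo → t.getD k 0 ≤ b := fun k hk => hlow k (by omega) hk
    have hhigh' : ∀ k : Nat, lo ≤ (k : Int) → k < t.length → b < t.getD k 0 :=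
      fun k h1 h2 => hhigh k h1 (by exact_mod_cast h2)
    by_cases hA : lo = (t.length : Int)
    · -- append case
      rw [if_pos hA]
      refine ⟨?_, ?_, ?_⟩
      · -- sorted
        rw [List.pairwise_append]
        refine ⟨hsort, by simp, ?_⟩
        intro x hx y hy
        simp only [List.mem_singleton] at hy; subst hy
        obtain ⟨k, hk, hkx⟩ := List.mem_iff_getElem.mp hx
        rw [← hkx, ← List.getD_eq_getElem _ 0 hk]
        exact hlow' k (by rw [hA]; exact_mod_cast hk)
      · -- realizability
        intro k hk
        rw [List.length_append, List.length_singleton] at hk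
        by_cases hkL : k < t.length
        · obtain ⟨s, l, hch, hlen, hval⟩ := hreal k hkL
          exact ⟨s, l, PCh_mono (Nat.le_succ p) hch, hlen,
            by rw [getD_append_lt hkL]; exact hval⟩
        · have hkeq : k = t.length := by omega
          subst hkeq
          rcases Nat.eq_zero_or_pos t.length with h0 | hpos
          · refine ⟨[], p, ?_, by simp [h0], by rw [getD_append_len]; exact hbp⟩
            exact PCh_concat.mpr ⟨PCh_nil _ _, by simp, by omega, hqp, by simp⟩
          · obtain ⟨s, l, hch, hlen, hval⟩ := hreal (t.length - 1) (by omega)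
            have hcc := PCh_concat.mp hch
            refine ⟨s ++ [l], p, ?_, by simp [hlen]; omega, by rw [getD_append_len]; exact hbp⟩
            refine PCh_concat.mpr ⟨PCh_mono (Nat.le_succ p) hch, ?_, by omega, hqp, ?_⟩
            · exact fun j hj => (hch.2.1 j hj).1
            · intro j hj
              have hlb : pvB arr l ≤ b := by
                rw [hval]
                exact hlow' (t.length - 1) (by rw [hA]; exact_mod_cast Nat.sub_lt hpos one_pos)
              rw [hbp]
              rcases List.mem_append.mp hj with hj' | hj'
              · exact le_trans (hcc.2.2.2.2 j hj') hlb
              · simp only [List.mem_singleton] at hj'; subst hj'; exact hlb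
      · -- dominance
        intro s l hch
        have hcc := PCh_concat.mp hch
        by_cases hlp : l = p
        · rw [hlp] at hch hcc ⊢
          rcases List.eq_nil_or_concat s with rfl | ⟨s₀, m, rfl⟩
          · refine ⟨by simp, ?_⟩
            simp only [List.length_nil]
            rcases Nat.eq_zero_or_pos t.length with h0 | hpos
            · have ht : t = [] := List.eq_nil_of_length_eq_zero h0
              subst ht
              have hv : (([] : List Int) ++ [b]).getD 0 0 = b := rfl
              rw [hv, hbp]
            · rw [getD_append_lt hpos, hbp]
              exact hlow' 0 (by rw [hA]; exact_mod_cast hpos)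
          · simp only [List.concat_eq_append] at hch hcc ⊢
            have hpm : PCh arr p (s₀ ++ [m]) := PCh_bound hcc.1 hcc.2.1
            obtain ⟨hm1, hm2⟩ := hdom s₀ m hpm
            have hmb : pvB arr m ≤ b := by
              rw [← hbp]; exact hcc.2.2.2.2 m (by simp)
            have hs0 : t.getD s₀.length 0 ≤ b := le_trans hm2 hmb
            constructor
            · simp only [List.length_append, List.length_singleton]
              omega
            · simp only [List.length_append, List.length_singleton]
              rw [hbp]
              by_cases he : s₀.length + 1 < t.length
              · rw [getD_append_lt he]
                exact hlow' _ (by rw [hA]; exact_mod_cast he)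
              · have hee : s₀.length + 1 = t.length := by omega
                rw [hee, getD_append_len]
        · -- l ≠ p
          have hlt : ∀ j ∈ s ++ [l], j < p := by
            intro j hj
            rcases List.mem_append.mp hj with hj' | hj'
            · have h1 := hcc.2.1 j hj'
              have h2 := hcc.2.2.1
              omega
            · simp only [List.mem_singleton] at hj'; subst hj'
              have h2 := hcc.2.2.1; omega
          obtain ⟨hd1, hd2⟩ := hdom s l (PCh_bound hch hlt)
          refine ⟨by simp; omega, ?_⟩
          rw [getD_append_lt hd1]
          exact hd2
    · -- replace case
      rw [if_neg hA]
      rw [PySem.List.pySetD_of_nonneg t _ hB0]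
      have hLlt : lo.toNat < t.length := by omega
      have hLlo : (lo.toNat : Int) = lo := by omega
      have hb_lt : b < t.getD lo.toNat 0 := hhigh' lo.toNat (by omega) hLlt
      have hpt : ∀ k : Nat, (t.set lo.toNat b).getD k 0 ≤ t.getD k 0 := by
        intro k
        by_cases hkL : k = lo.toNat
        · subst hkL
          rw [getD_set_self hLlt]
          exact le_of_lt hb_lt
        · rw [getD_set_ne hkL]
      refine ⟨?_, ?_, ?_⟩
      · -- sorted
        rw [List.pairwise_iff_getElem]
        intro a c ha hc hac
        rw [List.length_set] at ha hc
        rw [← List.getD_eq_getElem _ 0 (by simpa using ha),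
            ← List.getD_eq_getElem _ 0 (by simpa using hc)]
        by_cases haL : a = lo.toNat
        · subst haL
          rw [getD_set_self hLlt, getD_set_ne (by omega)]
          exact le_of_lt (hhigh' c (by omega) hc)
        · rw [getD_set_ne haL]
          by_cases hcL : c = lo.toNat
          · subst hcL
            rw [getD_set_self hLlt]
            exact hlow' a (by omega)
          · rw [getD_set_ne hcL]
            exact sorted_getD_mono hsort (le_of_lt hac) hc
      · -- realizability
        intro k hk
        rw [List.length_set] at hk
        by_cases hkL : k = lo.toNat
        · subst hkL
          rcases Nat.eq_zero_or_pos lo.toNat with h0 | hpos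
          · refine ⟨[], p, ?_, by simp [h0], ?_⟩
            · exact PCh_concat.mpr ⟨PCh_nil _ _, by simp, by omega, hqp, by simp⟩
            · rw [h0] at hLlt ⊢
              rw [getD_set_self hLlt]
              exact hbp
          · obtain ⟨s, l, hch, hlen, hval⟩ := hreal (lo.toNat - 1) (by omega)
            have hcc := PCh_concat.mp hch
            have hlb : pvB arr l ≤ b := by
              rw [hval]
              exact hlow' (lo.toNat - 1) (by omega)
            refine ⟨s ++ [l], p, ?_, by simp [hlen]; omega, ?_⟩
            · refine PCh_concat.mpr ⟨PCh_mono (Nat.le_succ p) hch, ?_, by omega, hqp, ?_⟩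
              · exact fun j hj => (hch.2.1 j hj).1
              · intro j hj
                rw [hbp]
                rcases List.mem_append.mp hj with hj' | hj'
                · exact le_trans (hcc.2.2.2.2 j hj') hlb
                · simp only [List.mem_singleton] at hj'; subst hj'; exact hlb
            · rw [getD_set_self hLlt]
              exact hbp
        · obtain ⟨s, l, hch, hlen, hval⟩ := hreal k hk
          exact ⟨s, l, PCh_mono (Nat.le_succ p) hch, hlen,
            by rw [getD_set_ne hkL]; exact hval⟩
      · -- dominance
        intro s l hch
        have hcc := PCh_concat.mp hch
        by_cases hlp : l = p
        · rw [hlp] at hch hcc ⊢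
          rcases List.eq_nil_or_concat s with rfl | ⟨s₀, m, rfl⟩
          · refine ⟨by simp; omega, ?_⟩
            simp only [List.length_nil]
            rcases Nat.eq_zero_or_pos lo.toNat with h0 | hpos
            · rw [h0] at hLlt ⊢
              rw [getD_set_self hLlt, hbp]
            · rw [getD_set_ne (by omega), hbp]
              exact hlow' 0 (by omega)
          · simp only [List.concat_eq_append] at hch hcc ⊢
            have hpm : PCh arr p (s₀ ++ [m]) := PCh_bound hcc.1 hcc.2.1
            obtain ⟨hm1, hm2⟩ := hdom s₀ m hpm
            have hmb : pvB arr m ≤ b := by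
              rw [← hbp]; exact hcc.2.2.2.2 m (by simp)
            have hs0lo : s₀.length < lo.toNat := by
              by_contra hcon
              have := hhigh' s₀.length (by omega) hm1
              have := le_trans hm2 hmb
              omega
            constructor
            · simp only [List.length_append, List.length_singleton, List.length_set]
              omega
            · simp only [List.length_append, List.length_singleton]
              rw [hbp]
              by_cases he : s₀.length + 1 = lo.toNat
              · rw [he, getD_set_self hLlt]
              · rw [getD_set_ne he]
                exact hlow' _ (by omega)
        · have hlt : ∀ j ∈ s ++ [l], j < p := by
            intro j hj
            rcases List.mem_append.mp hj with hj' | hj'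
            · have h1 := hcc.2.1 j hj'
              have h2 := hcc.2.2.1
              omega
            · simp only [List.mem_singleton] at hj'; subst hj'
              have h2 := hcc.2.2.1; omega
          obtain ⟨hd1, hd2⟩ := hdom s l (PCh_bound hch hlt)
          refine ⟨by rw [List.length_set]; exact hd1, le_trans (hpt s.length) hd2⟩

lemma BInv_take (arr : List Int) :
    ∀ m : Nat, m ≤ arr.length →
      BInv arr m (((PySem.List.enumerate arr 0).take m).foldl fixArrStep []) := by
  intro m
  induction m with
  | zero => intro _; simpa using BInv_init arr
  | succ m ih =>
    intro hm
    have hm' : m < arr.length := by omega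
    rw [List.take_succ]
    have he : (PySem.List.enumerate arr 0)[m]? = some ((m : Int), arr[m]) := by
      rw [PySem.List.getElem?_enumerate]
      rw [List.getElem?_eq_getElem hm']
      simp
    rw [he]
    simp only [Option.toList_some]
    rw [List.foldl_append]
    simp only [List.foldl_cons, List.foldl_nil]
    have hstep := BInv_step arr m (((PySem.List.enumerate arr 0).take m).foldl fixArrStep [])
      hm' (ih (by omega))
    rw [show (arr[m] : Int) = arr.getD m 0 from (List.getD_eq_getElem _ _ hm').symm]
    exact hstep

lemma BInv_final (arr : List Int) :
    BInv arr arr.length ((PySem.List.enumerate arr 0).foldl fixArrStep []) := by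
  have h := BInv_take arr arr.length (le_refl _)
  rwa [List.take_of_length_le (by rw [PySem.List.length_enumerate])] at h

-- ---------- A side ----------

def DPspec (arr : List Int) (k : Nat) (v : Int) : Prop :=
  if 1 ≤ pvB arr k then
    (∃ s, PCh arr (k + 1) (s ++ [k]) ∧ (s.length : Int) + 1 = v) ∧
    (∀ s, PCh arr (k + 1) (s ++ [k]) → (s.length : Int) + 1 ≤ v)
  else v = 1

def AInv (arr : List Int) (p : Nat) (st : Int × List Int) : Prop :=
  st.2.length = arr.length ∧
  (∀ k : Nat, p ≤ k → k < arr.length → st.2.getD k 0 = 1) ∧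
  (∀ k : Nat, k < p → DPspec arr k (st.2.getD k 0)) ∧
  1 ≤ st.1 ∧
  (st.1 = 1 ∨ ∃ s l, PCh arr p (s ++ [l]) ∧ (s.length : Int) + 1 = st.1) ∧
  (∀ s l, PCh arr p (s ++ [l]) → (s.length : Int) + 1 ≤ st.1)

-- chains counted by the inner loop: prefix part bounded by J, all b-values ≤ b i
def ECh (arr : List Int) (i J : Nat) (s : List Nat) : Prop :=
  PCh arr J s ∧ ∀ j ∈ s, pvB arr j ≤ pvB arr i

def InnerInv (arr : List Int) (i : Nat) (dp₀ : List Int) (J : Nat) (dp : List Int) : Prop :=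
  dp.length = dp₀.length ∧
  (∀ k : Nat, k ≠ i → dp.getD k 0 = dp₀.getD k 0) ∧
  (if 1 ≤ pvB arr i then
    (∃ s, ECh arr i J s ∧ (s.length : Int) + 1 = dp.getD i 0) ∧
    (∀ s, ECh arr i J s → (s.length : Int) + 1 ≤ dp.getD i 0)
   else dp.getD i 0 = dp₀.getD i 0)

lemma cond_iff (arr : List Int) {i J : Nat} (hJi : J < i) :
    (arr.getD J 0 < arr.getD i 0 ∧ arr.getD i 0 - arr.getD J 0 ≥ (i : Int) - (J : Int) ∧
     arr.getD i 0 ≥ (i : Int) + 1 ∧ arr.getD J 0 ≥ (J : Int) + 1) ↔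
    (1 ≤ pvB arr i ∧ 1 ≤ pvB arr J ∧ pvB arr J ≤ pvB arr i) := by
  have hc : (J : Int) < (i : Int) := by exact_mod_cast hJi
  unfold pvB
  constructor
  · rintro ⟨h1, h2, h3, h4⟩; omega
  · rintro ⟨h1, h2, h3⟩; omega

lemma ECh_mono {arr : List Int} {i J : Nat} {s : List Nat} (h : ECh arr i J s) :
    ECh arr i (J + 1) s := ⟨PCh_mono (Nat.le_succ J) h.1, h.2⟩

lemma ECh_shrink {arr : List Int} {i J : Nat} {s : List Nat}
    (h : ECh arr i (J + 1) s) (hJ : J ∉ s) : ECh arr i J s := by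
  refine ⟨PCh_bound h.1 ?_, h.2⟩
  intro j hj
  have h1 := (h.1.2.1 j hj).1
  have h2 : j ≠ J := fun he => hJ (he ▸ hj)
  omega

lemma ECh_zero {arr : List Int} {i : Nat} {s : List Nat} (h : ECh arr i 0 s) : s = [] :=
  PCh_zero h.1

lemma ECh_top {arr : List Int} {i : Nat} (hqi : 1 ≤ pvB arr i) (s : List Nat) :
    ECh arr i i s ↔ PCh arr (i + 1) (s ++ [i]) := by
  rw [PCh_concat]
  constructor
  · rintro ⟨hp, hle⟩
    exact ⟨PCh_mono (Nat.le_succ i) hp, fun j hj => (hp.2.1 j hj).1, Nat.lt_succ_self i, hqi, hle⟩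
  · rintro ⟨hp, hlt, _, _, hle⟩
    exact ⟨PCh_bound hp hlt, hle⟩

lemma inner_step (arr : List Int) (i J : Nat) (dp₀ dp : List Int)
    (hlen0 : dp₀.length = arr.length) (hi : i < arr.length) (hJi : J < i)
    (hdp : ∀ k : Nat, k < i → DPspec arr k (dp₀.getD k 0))
    (h : InnerInv arr i dp₀ J dp) :
    InnerInv arr i dp₀ (J + 1) (fixArrIf arr (i : Int) dp (J : Int)) := by
  obtain ⟨h1, h2, h3⟩ := h
  have hilen : i < dp.length := by omega
  unfold fixArrIf
  simp only [PySem.List.pyGetD_natCast, PySem.List.pySetD_natCast]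
  split_ifs with hc
  · rw [cond_iff arr hJi] at hc
    obtain ⟨hqi, hqJ, hJle⟩ := hc
    have hiJ : J ≠ i := by omega
    have hw := hdp J hJi
    unfold DPspec at hw
    rw [if_pos hqJ] at hw
    obtain ⟨⟨s₀, hs₀, hw1⟩, hw2⟩ := hw
    have hdpJ : dp.getD J 0 = dp₀.getD J 0 := h2 J hiJ
    refine ⟨by rw [List.length_set]; exact h1, ?_, ?_⟩
    · intro k hk
      rw [getD_set_ne hk]
      exact h2 k hk
    · rw [if_pos hqi] at h3 ⊢
      obtain ⟨⟨sE, hsE, hvE⟩, hmaxE⟩ := h3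
      rw [getD_set_self hilen]
      constructor
      · by_cases hm : dp.getD J 0 + 1 ≤ dp.getD i 0
        · rw [max_eq_left hm]
          exact ⟨sE, ECh_mono hsE, hvE⟩
        · rw [max_eq_right (le_of_lt (not_le.mp hm))]
          refine ⟨s₀ ++ [J], ⟨hs₀, ?_⟩, ?_⟩
          · intro j hj
            rcases List.mem_append.mp hj with hj' | hj'
            · exact le_trans ((PCh_concat.mp hs₀).2.2.2.2 j hj') hJle
            · simp only [List.mem_singleton] at hj'; subst hj'; exact hJle
          · simp only [List.length_append, List.length_singleton]
            rw [hdpJ]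
            push_cast
            omega
      · intro s hs
        by_cases hJs : J ∈ s
        · obtain ⟨s₁, rfl⟩ := chain_mem_last hs.1.1 (fun j hj => (hs.1.2.1 j hj).1) hJs
          have hb2 := hw2 s₁ hs.1
          have hmax := le_max_right (dp.getD i 0) (dp.getD J 0 + 1)
          simp only [List.length_append, List.length_singleton]
          push_cast
          omega
        · have hsJ := ECh_shrink hs hJs
          have hb2 := hmaxE _ hsJ
          have hmax := le_max_left (dp.getD i 0) (dp.getD J 0 + 1)
          omega
  · refine ⟨h1, h2, ?_⟩
    by_cases hqi : 1 ≤ pvB arr i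
    · rw [if_pos hqi] at h3 ⊢
      obtain ⟨⟨sE, hsE, hvE⟩, hmaxE⟩ := h3
      constructor
      · exact ⟨sE, ECh_mono hsE, hvE⟩
      · intro s hs
        have hJs : J ∉ s := by
          intro hmem
          apply hc
          rw [cond_iff arr hJi]
          exact ⟨hqi, (hs.1.2.1 J hmem).2, hs.2 J hmem⟩
        exact hmaxE _ (ECh_shrink hs hJs)
    · rw [if_neg hqi] at h3 ⊢
      exact h3

lemma inner_partial (arr : List Int) (i : Nat) (dp₀ : List Int)
    (hlen : dp₀.length = arr.length) (hi : i < arr.length)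
    (hone : dp₀.getD i 0 = 1)
    (hdp : ∀ k : Nat, k < i → DPspec arr k (dp₀.getD k 0)) :
    ∀ J : Nat, J ≤ i →
      InnerInv arr i dp₀ J
        ((PySem.List.pyRange 0 (J : Int) 1).foldl (fixArrIf arr (i : Int)) dp₀) := by
  intro J
  induction J with
  | zero =>
    intro _
    simp only [Nat.cast_zero]
    rw [PySem.List.pyRange_one_eq_nil (le_refl 0)]
    simp only [List.foldl_nil]
    refine ⟨rfl, fun k _ => rfl, ?_⟩
    by_cases hqi : 1 ≤ pvB arr i
    · rw [if_pos hqi]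
      constructor
      · refine ⟨[], ⟨PCh_nil _ _, by simp⟩, ?_⟩
        simp only [List.length_nil, Nat.cast_zero, zero_add]
        exact hone.symm
      · intro s hs
        have hse := ECh_zero hs
        subst hse
        simp only [List.length_nil, Nat.cast_zero, zero_add]
        exact le_of_eq hone.symm
    · rw [if_neg hqi]
  | succ J ihJ =>
    intro hJ
    have hInv := ihJ (by omega)
    have hcast : ((J + 1 : Nat) : Int) = (J : Int) + 1 := by push_cast; ring
    rw [hcast, PySem.List.pyRange_one_succ_right (Int.natCast_nonneg J), List.foldl_append]
    simp only [List.foldl_cons, List.foldl_nil]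
    exact inner_step arr i J dp₀ _ hlen hi (by omega) hdp hInv

lemma inner_spec (arr : List Int) (i : Nat) (dp₀ : List Int)
    (hlen : dp₀.length = arr.length) (hi : i < arr.length)
    (hone : dp₀.getD i 0 = 1)
    (hdp : ∀ k : Nat, k < i → DPspec arr k (dp₀.getD k 0)) :
    InnerInv arr i dp₀ i (fixArrInner arr (i : Int) dp₀) := by
  unfold fixArrInner
  exact inner_partial arr i dp₀ hlen hi hone hdp i (le_refl i)

lemma nat_lt_zero_nil {s : List Nat} (h : ∀ j ∈ s, j < 0) : s = [] := by
  cases s with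
  | nil => rfl
  | cons a tl => exact absurd (h a (by simp)) (by omega)

lemma getD_replicate_one {n k : Nat} (h : k < n) :
    (List.replicate n (1 : Int)).getD k 0 = 1 := by
  rw [List.getD_eq_getElem _ _ (by simpa using h)]
  simp

lemma AInv_init (arr : List Int) (h : 0 < arr.length) :
    AInv arr 1 (1, List.replicate arr.length (1 : Int)) := by
  refine ⟨by simp, ?_, ?_, le_refl _, Or.inl rfl, ?_⟩
  · intro k _ hk; exact getD_replicate_one hk
  · intro k hk
    have hk0 : k = 0 := by omega
    subst hk0
    have hv : (List.replicate arr.length (1 : Int)).getD 0 0 = 1 := getD_replicate_one h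
    unfold DPspec
    rw [hv]
    by_cases hq : 1 ≤ pvB arr 0
    · rw [if_pos hq]
      constructor
      · exact ⟨[], PCh_concat.mpr ⟨PCh_nil _ _, by simp, by omega, hq, by simp⟩, by simp⟩
      · intro s hs
        have hlt := (PCh_concat.mp hs).2.1
        have : s = [] := nat_lt_zero_nil hlt
        subst this; simp
    · rw [if_neg hq]
  · intro s l hs
    have hc := PCh_concat.mp hs
    have hl : l = 0 := by omega
    subst hl
    have : s = [] := nat_lt_zero_nil hc.2.1
    subst this; simp

lemma AInv_mk (arr : List Int) (p : Nat) (a : Int) (d : List Int)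
    (c1 : d.length = arr.length)
    (c2 : ∀ k : Nat, p ≤ k → k < arr.length → d.getD k 0 = 1)
    (c3 : ∀ k : Nat, k < p → DPspec arr k (d.getD k 0))
    (c4 : 1 ≤ a)
    (c5 : a = 1 ∨ ∃ s l, PCh arr p (s ++ [l]) ∧ (s.length : Int) + 1 = a)
    (c6 : ∀ s l, PCh arr p (s ++ [l]) → (s.length : Int) + 1 ≤ a) :
    AInv arr p (a, d) := ⟨c1, c2, c3, c4, c5, c6⟩

lemma AInv_step (arr : List Int) (i : Nat) (st : Int × List Int)
    (h1 : 1 ≤ i) (hi : i < arr.length) (h : AInv arr i st) :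
    AInv arr (i + 1) (fixArrOuter arr st (i : Int)) := by
  obtain ⟨hL, hAbove, hBelow, hml1, hmlEx, hmlMax⟩ := h
  have hone : st.2.getD i 0 = 1 := hAbove i (le_refl i) hi
  have hII := inner_spec arr i st.2 hL hi hone (fun k hk => hBelow k hk)
  obtain ⟨hI1, hI2, hI3⟩ := hII
  have hDP : DPspec arr i ((fixArrInner arr (i : Int) st.2).getD i 0) := by
    unfold DPspec
    by_cases hqi : 1 ≤ pvB arr i
    · rw [if_pos hqi]
      rw [if_pos hqi] at hI3
      obtain ⟨⟨sE, hsE, hvE⟩, hmaxE⟩ := hI3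
      constructor
      · exact ⟨sE, (ECh_top hqi sE).mp hsE, hvE⟩
      · intro s hs
        exact hmaxE s ((ECh_top hqi s).mpr hs)
    · rw [if_neg hqi]
      rw [if_neg hqi] at hI3
      rw [hI3, hone]
  show AInv arr (i + 1)
    (max st.1 (PySem.List.pyGetD (fixArrInner arr (i : Int) st.2) (i : Int) 0),
     fixArrInner arr (i : Int) st.2)
  rw [PySem.List.pyGetD_natCast]
  apply AInv_mk
  · rw [hI1]; exact hL
  · intro k hk hkn
    have hki : k ≠ i := by omega
    rw [hI2 k hki]
    exact hAbove k (by omega) hkn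
  · intro k hk
    by_cases hki : k = i
    · subst hki; exact hDP
    · rw [hI2 k hki]; exact hBelow k (by omega)
  · exact le_trans hml1 (le_max_left _ _)
  · by_cases hm : (fixArrInner arr (i : Int) st.2).getD i 0 ≤ st.1
    · rw [max_eq_left hm]
      rcases hmlEx with h' | ⟨s, l, hch, hlen'⟩
      · exact Or.inl h'
      · exact Or.inr ⟨s, l, PCh_mono (Nat.le_succ i) hch, hlen'⟩
    · rw [max_eq_right (le_of_lt (not_le.mp hm))]
      unfold DPspec at hDP
      by_cases hqi : 1 ≤ pvB arr i
      · rw [if_pos hqi] at hDP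
        obtain ⟨⟨s, hs, hv⟩, _⟩ := hDP
        exact Or.inr ⟨s, i, hs, hv⟩
      · rw [if_neg hqi] at hDP
        exfalso
        rw [hDP] at hm
        omega
  · intro s l hch
    have hcc := PCh_concat.mp hch
    by_cases hli : l = i
    · rw [hli] at hch hcc
      unfold DPspec at hDP
      rw [if_pos hcc.2.2.2.1] at hDP
      exact le_trans (hDP.2 s hch) (le_max_right _ _)
    · have hbound : ∀ j ∈ s ++ [l], j < i := by
        intro j hj
        rcases List.mem_append.mp hj with hj' | hj'
        · have ha := hcc.2.1 j hj'
          have hb := hcc.2.2.1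
          omega
        · simp only [List.mem_singleton] at hj'; subst hj'
          have hb := hcc.2.2.1; omega
      exact le_trans (hmlMax s l (PCh_bound hch hbound)) (le_max_left _ _)

lemma AInv_final (arr : List Int) (h : 0 < arr.length) :
    AInv arr arr.length
      ((PySem.List.pyRange 1 (arr.length : Int) 1).foldl (fixArrOuter arr)
        (1, List.replicate arr.length (1 : Int))) := by
  suffices hgen : ∀ m : Nat, 1 ≤ m → m ≤ arr.length →
      AInv arr m ((PySem.List.pyRange 1 (m : Int) 1).foldl (fixArrOuter arr)
        (1, List.replicate arr.length (1 : Int))) by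
    exact hgen arr.length h (le_refl _)
  intro m
  induction m with
  | zero => intro h0 _; exact absurd h0 (by omega)
  | succ m ihm =>
    intro _ hm
    rcases Nat.eq_zero_or_pos m with rfl | hm1
    · norm_num
      exact AInv_init arr h
    · have hcast : ((m + 1 : Nat) : Int) = (m : Int) + 1 := by push_cast; ring
      rw [hcast, PySem.List.pyRange_one_succ_right (by exact_mod_cast hm1), List.foldl_append]
      simp only [List.foldl_cons, List.foldl_nil]
      exact AInv_step arr m _ hm1 (by omega) (ihm hm1 (by omega))

-- ---------- glue ----------

lemma main_eq (arr : List Int) : fix_arr arr = fix_arr_alt arr := by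
  rcases Nat.eq_zero_or_pos arr.length with h0 | hpos
  · have harr : arr = [] := List.eq_nil_of_length_eq_zero h0
    subst harr
    decide
  · have hA := AInv_final arr hpos
    have hB := BInv_final arr
    set stA := (PySem.List.pyRange 1 (arr.length : Int) 1).foldl (fixArrOuter arr)
      (1, List.replicate arr.length (1 : Int)) with hstA
    set t := (PySem.List.enumerate arr 0).foldl fixArrStep [] with ht
    obtain ⟨_, _, _, hml1, hmlEx, hmlMax⟩ := hA
    obtain ⟨_, hreal, hdom⟩ := hB
    have key : stA.1 = max 1 (t.length : Int) := by
      apply le_antisymm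
      · rcases hmlEx with h' | ⟨s, l, hch, hlen'⟩
        · rw [h']; exact le_max_left _ _
        · have hd := (hdom s l hch).1
          have hd' : (s.length : Int) + 1 ≤ (t.length : Int) := by exact_mod_cast hd
          rw [← hlen']
          exact le_trans hd' (le_max_right _ _)
      · rcases Nat.eq_zero_or_pos t.length with ht0 | htpos
        · rw [ht0]
          simpa using hml1
        · obtain ⟨s, l, hch, hlen', _⟩ := hreal (t.length - 1) (by omega)
          have hmx := hmlMax s l hch
          have hmax : max 1 (t.length : Int) = (t.length : Int) :=
            max_eq_right (by exact_mod_cast htpos)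
          omega
    have e1 : fix_arr arr = (arr.length : Int) - stA.1 := rfl
    have e2 : fix_arr_alt arr = (arr.length : Int) - max 1 (t.length : Int) := rfl
    rw [e1, e2, key]

-- ===== VERDICT (by name: the statement is the Claim_ definition above) =====
theorem fix_arr_spec : Claim_equal_fix_arr := by
  intro arr _
  unfold Spec_fix_arr
  exact main_eq arr
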